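-- pv_equiv track=rewrite | github.com/memory-eight-way/memory | quiz/make-quiz.py | proc_line_del_1_9_17
-- ===== SOURCE A (Python) =====
-- MASK_CHAR="_"
--
-- def proc_line_del_1_9_17(line):
--     w_words=line.split(" ")
--     w_new_words=list()
--     wcount=1
--     for w_word in w_words:
--         if(wcount%8!=1):
--             w_new_words.append(w_word)
--         else:
--             w_new_words.append(MASK_CHAR*len(w_word))
--         wcount=wcount+1
--     return " ".join(w_new_words)
-- ===== SOURCE B (Python) =====
-- MASK_CHAR = "_"
--
-- def proc_line_del_1_9_17(line):
--     words = line.split(" ")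
--     out = []
--     for start in range(0, len(words), 8):
--         chunk = words[start:start+8]
--         out.append(MASK_CHAR * len(chunk[0]))
--         out.extend(chunk[1:])
--     return " ".join(out)
-- ===== Notes on version B (the rewrite author's own statement) =====
-- stated objective: alternative
-- what changed: B replaces A's per-word counter with a modulo branch on every word by direct iteration over the mask positions range(0, len(words), 8), masking the head of each 8-word chunk and copying the rest unchanged.
import Mathlib
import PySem

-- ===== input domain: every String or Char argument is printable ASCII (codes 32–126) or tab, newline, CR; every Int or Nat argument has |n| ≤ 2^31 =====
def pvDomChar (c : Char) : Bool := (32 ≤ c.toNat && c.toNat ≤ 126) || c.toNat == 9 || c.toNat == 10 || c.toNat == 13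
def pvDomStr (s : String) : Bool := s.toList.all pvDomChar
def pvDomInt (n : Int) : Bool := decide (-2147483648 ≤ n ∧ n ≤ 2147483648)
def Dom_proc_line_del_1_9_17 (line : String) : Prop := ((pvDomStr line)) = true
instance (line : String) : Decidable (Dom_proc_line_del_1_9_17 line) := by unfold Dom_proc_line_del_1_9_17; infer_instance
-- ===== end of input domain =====

-- B masks the same every-8th word but walks the mask positions directly (range(0, len, 8), chunks of 8)
-- instead of A's per-word counter with a branch on every word; objective: alternative decomposition.

-- ===== PORT A =====
-- MASK_CHAR * len(w)  ("_" repeated len(w) times; exact: ASCII repetition of a single char)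
def pvMask (w : String) : String := String.ofList (List.replicate (PySem.Str.len w).toNat '_')

-- one iteration of A's loop: state = (w_new_words, wcount)
def pvStepA (acc : List String × Int) (w : String) : List String × Int :=
  if PySem.Int.mod acc.2 8 ≠ 1 then (acc.1 ++ [w], acc.2 + 1)
  else (acc.1 ++ [pvMask w], acc.2 + 1)

def proc_line_del_1_9_17 (line : String) : String :=
  -- line.split(" "): sep " " ≠ "" so split? is always some; .getD [] only discharges the option
  let w_words := (PySem.Str.split? line " ").getD []
  PySem.Str.join " " (w_words.foldl pvStepA ([], 1)).1

-- ===== PORT B =====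
-- one iteration of B's loop over start ∈ range(0, len(words), 8):
-- chunk = words[start:start+8]; out.append(mask(chunk[0])); out.extend(chunk[1:])
def pvChunkStep (words acc : List String) (start : Int) : List String :=
  match PySem.List.slice words (some start) (some (start + 8)) with
  | [] => acc            -- unreachable guard: start < len(words) so the chunk is nonempty
  | c :: cs => (acc ++ [pvMask c]) ++ cs

def proc_line_del_1_9_17_alt (line : String) : String :=
  let words := (PySem.Str.split? line " ").getD []
  PySem.Str.join " " ((PySem.List.pyRange 0 (words.length : Int) 8).foldl (pvChunkStep words) [])

-- ===== PRECONDITION & SPEC =====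
def Spec_proc_line_del_1_9_17 (line : String) (out : String) : Prop := out = proc_line_del_1_9_17_alt line
instance (line : String) (out : String) : Decidable (Spec_proc_line_del_1_9_17 line out) := by unfold Spec_proc_line_del_1_9_17; infer_instance

-- ===== CLAIM (what is proved, stated in full; the proofs are below) =====
def Claim_equal_proc_line_del_1_9_17 : Prop := ∀ (line : String), Dom_proc_line_del_1_9_17 line → Spec_proc_line_del_1_9_17 line (proc_line_del_1_9_17 line)

-- ===== LEMMAS AND PROOFS =====

-- the common denotation: pvMaskFrom k masks the word k positions ahead, then every 8th after it
def pvMaskFrom : Nat → List String → List String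
  | _, [] => []
  | 0, w :: ws => pvMask w :: pvMaskFrom 7 ws
  | k + 1, w :: ws => w :: pvMaskFrom k ws

-- what A's loop produces from counter c on
def pvSpecList (c : Int) : List String → List String
  | [] => []
  | w :: ws => (if PySem.Int.mod c 8 ≠ 1 then w else pvMask w) :: pvSpecList (c + 1) ws

lemma pvFoldA (ws : List String) : ∀ (acc : List String) (c : Int),
    (ws.foldl pvStepA (acc, c)).1 = acc ++ pvSpecList c ws := by
  induction ws with
  | nil => intro acc c; simp [pvSpecList]
  | cons w ws ih =>
    intro acc c
    simp only [List.foldl_cons, pvStepA, pvSpecList]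
    split_ifs with h
    · rw [ih]; simp
    · rw [ih]; simp

lemma pvSpec_eq_maskFrom (ws : List String) : ∀ (m j : Nat), j < 8 →
    pvSpecList (8 * (m : Int) + 1 + j) ws = pvMaskFrom ((8 - j) % 8) ws := by
  induction ws with
  | nil => intro m j hj; cases hk : (8 - j) % 8 <;> simp [pvSpecList, pvMaskFrom]
  | cons w ws ih =>
    intro m j hj
    have hmod : PySem.Int.mod (8 * (m : Int) + 1 + j) 8 = ((1 + j : Int)) % 8 := by
      rw [PySem.Int.mod_eq_emod_of_pos (by norm_num)]; omega
    by_cases hj0 : j = 0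
    · subst hj0
      have h1 : ¬ PySem.Int.mod (8 * (m : Int) + 1 + ((0 : Nat) : Int)) 8 ≠ 1 := by
        rw [hmod]; norm_num
      have h2 : 8 * (m : Int) + 1 + ((0 : Nat) : Int) + 1 = 8 * (m : Int) + 1 + ((1 : Nat) : Int) := by
        push_cast; ring
      rw [pvSpecList, if_neg h1, h2, ih m 1 (by norm_num)]
      norm_num [pvMaskFrom]
    · have hne : PySem.Int.mod (8 * (m : Int) + 1 + j) 8 ≠ 1 := by rw [hmod]; omega
      by_cases hj7 : j = 7
      · subst hj7
        have h2 : 8 * (m : Int) + 1 + ((7 : Nat) : Int) + 1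
            = 8 * ((m + 1 : Nat) : Int) + 1 + ((0 : Nat) : Int) := by push_cast; ring
        rw [pvSpecList, if_pos hne, h2, ih (m + 1) 0 (by norm_num)]
        norm_num [pvMaskFrom]
      · have hlt : j + 1 < 8 := by omega
        have h2 : 8 * (m : Int) + 1 + (j : Int) + 1 = 8 * (m : Int) + 1 + ((j + 1 : Nat) : Int) := by
          push_cast; ring
        have hk : (8 - j) % 8 = (8 - (j + 1)) % 8 + 1 := by omega
        rw [pvSpecList, if_pos hne, h2, ih m (j + 1) hlt, hk, pvMaskFrom]

lemma pvMaskFrom_eq (ws : List String) : ∀ (k : Nat),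
    pvMaskFrom k ws = ws.take k ++ pvMaskFrom 0 (ws.drop k) := by
  induction ws with
  | nil => intro k; simp [pvMaskFrom]
  | cons w ws ih =>
    intro k
    cases k with
    | zero => simp
    | succ k => rw [pvMaskFrom, List.take_succ_cons, List.drop_succ_cons, ih k]; simp

lemma pvRange8_nil {a b : Int} (h : b ≤ a) : PySem.List.pyRange a b 8 = [] := by
  rw [PySem.List.pyRange_of_pos _ _ (by norm_num)]
  simp [not_lt.mpr h]

lemma pvRange8_cons {a b : Int} (h : a < b) :
    PySem.List.pyRange a b 8 = a :: PySem.List.pyRange (a + 8) b 8 := by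
  rw [PySem.List.pyRange_of_pos _ _ (by norm_num), PySem.List.pyRange_of_pos _ _ (by norm_num)]
  by_cases h2 : a + 8 < b
  · have hn : (if a < b then ((b - a + 8 - 1) / 8).toNat else 0)
        = (if a + 8 < b then ((b - (a + 8) + 8 - 1) / 8).toNat else 0) + 1 := by
      simp only [if_pos h, if_pos h2]; omega
    rw [hn, List.range_succ_eq_map, List.map_cons, List.map_map]
    refine congrArg₂ _ (by ring) (List.map_congr_left ?_)
    intro k _
    simp only [Function.comp]; push_cast; ring
  · have hn : (if a < b then ((b - a + 8 - 1) / 8).toNat else 0) = 1 := by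
      simp only [if_pos h]; omega
    rw [hn]
    simp [h2]

lemma pvFoldB_nil (words : List String) {a : Nat} (h : words.length ≤ a) (acc : List String) :
    (PySem.List.pyRange a (words.length : Int) 8).foldl (pvChunkStep words) acc
      = acc ++ pvMaskFrom 0 (words.drop a) := by
  rw [pvRange8_nil (by exact_mod_cast h), List.drop_eq_nil_of_le h]
  simp [pvMaskFrom]

lemma pvFoldB (words : List String) (k : Nat) : ∀ (a : Nat) (acc : List String),
    words.length ≤ a + k →
    (PySem.List.pyRange a (words.length : Int) 8).foldl (pvChunkStep words) acc
      = acc ++ pvMaskFrom 0 (words.drop a) := by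
  induction k with
  | zero => intro a acc h; exact pvFoldB_nil words (by omega) acc
  | succ k ih =>
    intro a acc h
    by_cases ha : words.length ≤ a
    · exact pvFoldB_nil words ha acc
    · have halt : a < words.length := by omega
      rw [pvRange8_cons (by exact_mod_cast halt), List.foldl_cons]
      obtain ⟨w, ws, hdrop⟩ : ∃ w ws, words.drop a = w :: ws := by
        cases hd : words.drop a with
        | nil => exact absurd (List.drop_eq_nil_iff.mp hd) (by omega)
        | cons w ws => exact ⟨w, ws, rfl⟩
      have hslice : PySem.List.slice words (some (a : Int)) (some ((a : Int) + 8))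
          = w :: ws.take 7 := by
        have hc : ((a : Int) + 8) = ((a + 8 : Nat) : Int) := by push_cast; ring
        rw [hc, PySem.List.slice_natCast, hdrop]
        have h8 : a + 8 - a = 8 := by omega
        rw [h8, List.take_succ_cons]
      have hstep : pvChunkStep words acc (a : Int) = (acc ++ [pvMask w]) ++ ws.take 7 := by
        simp [pvChunkStep, hslice]
      have hcast : ((a : Int) + 8) = ((a + 8 : Nat) : Int) := by push_cast; ring
      rw [hstep, hcast, ih (a + 8) _ (by omega)]
      have hdrop8 : words.drop (a + 8) = ws.drop 7 := by
        have h88 : words.drop (a + 8) = (words.drop a).drop 8 := by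
          rw [List.drop_drop]
        rw [h88, hdrop]; simp
      rw [hdrop8, hdrop, pvMaskFrom, pvMaskFrom_eq ws 7]
      simp

-- ===== VERDICT (by name: the statement is the Claim_ definition above) =====
theorem proc_line_del_1_9_17_spec : Claim_equal_proc_line_del_1_9_17 := by
  intro line _
  unfold Spec_proc_line_del_1_9_17
  simp only [proc_line_del_1_9_17, proc_line_del_1_9_17_alt]
  generalize (PySem.Str.split? line " ").getD [] = ws
  have hb := pvFoldB ws ws.length 0 [] (by omega)
  rw [Nat.cast_zero] at hb
  rw [pvFoldA ws [] 1, hb]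
  have h1 : (1 : Int) = 8 * ((0 : Nat) : Int) + 1 + ((0 : Nat) : Int) := by norm_num
  rw [h1, pvSpec_eq_maskFrom ws 0 0 (by norm_num)]
  simp
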